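-- pv_equiv track=rewrite | github.com/BinyamMamo/GPC_Contest | problem_set_2019/photo.py | count_duplicate
-- ===== SOURCE A (Python) =====
-- def count_duplicate(array):
--     visited = set()
--     count = {}
--     for item in array:
--         if array.count(item) > 1:
--             if count.get(item) is None:
--                 count[item] = 0
--             else:
--                 count[item] += 1
--     return count
-- ===== SOURCE B (Python) =====
-- def count_duplicate(array):
--     freq = {}
--     for item in array:
--         freq[item] = freq.get(item, 0) + 1
--     result = {}
--     for item, c in freq.items():
--         if c > 1:
--             result[item] = c - 1
--     return result
-- ===== Notes on version B (the rewrite author's own statement) =====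
-- stated objective: faster
-- what changed: A rescans the whole list with array.count for every element inside its loop; B builds a frequency dictionary in one linear pass and then emits freq-1 for each distinct key with freq>1 in a second pass over the distinct keys.
import Mathlib
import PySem

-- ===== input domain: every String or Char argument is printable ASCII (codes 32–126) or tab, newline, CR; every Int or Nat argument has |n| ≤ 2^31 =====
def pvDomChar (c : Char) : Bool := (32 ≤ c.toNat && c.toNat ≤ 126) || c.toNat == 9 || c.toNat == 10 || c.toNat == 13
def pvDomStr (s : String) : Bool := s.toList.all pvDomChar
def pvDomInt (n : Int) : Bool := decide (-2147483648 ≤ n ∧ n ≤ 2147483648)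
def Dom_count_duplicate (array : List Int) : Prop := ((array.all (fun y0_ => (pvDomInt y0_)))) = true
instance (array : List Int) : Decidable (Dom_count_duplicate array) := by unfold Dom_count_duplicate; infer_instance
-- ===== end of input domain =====

-- B replaces A's quadratic repeated `array.count` scanning by one frequency-table pass plus a
-- filtering pass over the distinct keys (objective: faster, O(n^2) → O(n) dict passes).

-- ===== PORT A =====
-- literal transliteration of A; Python's `visited = set()` is dead code and has no effect on the result
def count_duplicate (array : List Int) : List (Int × Int) :=
  (array.foldl (fun count item =>
      if PySem.List.count array item > 1 then
        match count.get? item with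
        | none => count.insert item (0 : Int)
        | some v => count.insert item (v + 1)
      else count) PySem.Dict.empty).items

-- ===== PORT B =====
def count_duplicate_alt (array : List Int) : List (Int × Int) :=
  let freq : PySem.Dict Int Int :=
    array.foldl (fun d x => d.insert x (d.getD x 0 + 1)) PySem.Dict.empty
  (freq.items.foldl (fun r (p : Int × Int) => if p.2 > 1 then r.insert p.1 (p.2 - 1) else r)
      PySem.Dict.empty).items

-- ===== PRECONDITION & SPEC =====
def Spec_count_duplicate (array : List Int) (out : List (Int × Int)) : Prop := out = count_duplicate_alt array
instance (array : List Int) (out : List (Int × Int)) : Decidable (Spec_count_duplicate array out) := by unfold Spec_count_duplicate; infer_instance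

-- ===== CLAIM (what is proved, stated in full; the proofs are below) =====
def Claim_equal_count_duplicate : Prop := ∀ (array : List Int), Dom_count_duplicate array → Spec_count_duplicate array (count_duplicate array)

-- ===== LEMMAS AND PROOFS =====

-- canonical description of both results: distinct elements of `p` (first-occurrence order)
-- that are duplicated in `array`, each paired with (its count in p) - 1
def itemsOf (array p : List Int) : List (Int × Int) :=
  ((PySem.Set.ofList p).filter (fun k => decide (List.count k array > 1))).map
    (fun k => (k, (List.count k p : Int) - 1))

lemma keys_itemsOf (array p : List Int) (d : PySem.Dict Int Int)
    (hd : d.items = itemsOf array p) :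
    d.keys = (PySem.Set.ofList p).filter (fun k => decide (List.count k array > 1)) := by
  show d.items.map Prod.fst = _
  rw [hd]
  simp only [itemsOf, List.map_map]
  have hid : (Prod.fst ∘ fun k => ((k : Int), (List.count k p : Int) - 1)) = id := rfl
  rw [hid, List.map_id]

lemma loopA (array : List Int) : ∀ (l p : List Int) (d : PySem.Dict Int Int),
    d.items = itemsOf array p →
    (l.foldl (fun count item =>
        if PySem.List.count array item > 1 then
          match count.get? item with
          | none => count.insert item (0 : Int)
          | some v => count.insert item (v + 1)
        else count) d).items = itemsOf array (p ++ l) := by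
  intro l
  induction l with
  | nil => intro p d hd; simpa using hd
  | cons x l ih =>
    intro p d hd
    have hkeys := keys_itemsOf array p d hd
    have hnd : d.keys.Nodup := by
      rw [hkeys]; exact (PySem.Set.nodup_ofList p).filter _
    have hset : PySem.Set.ofList (p ++ [x]) = (PySem.Set.ofList p).add x :=
      PySem.Set.ofList_append_singleton p x
    have happ : p ++ x :: l = (p ++ [x]) ++ l := by simp
    rw [List.foldl_cons, happ]
    by_cases hc : PySem.List.count array x > 1
    · -- duplicated element: A records/increments it
      have hc' : 1 < List.count x array := hc
      rw [if_pos hc]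
      by_cases hmem : x ∈ p
      · -- x already a key: get? = some (count x p - 1)
        have hitem : (x, (List.count x p : Int) - 1) ∈ d.items := by
          rw [hd]
          exact List.mem_map_of_mem (by
            simp [List.mem_filter, PySem.Set.mem_ofList, hmem, hc'])
        have hget : d.get? x = some ((List.count x p : Int) - 1) :=
          PySem.Dict.get?_of_mem_items d hitem hnd
        rw [hget]
        apply ih
        have hcont : d.contains x = true := by
          rw [PySem.Dict.contains_eq_decide_mem_keys, hkeys]
          simp [List.mem_filter, PySem.Set.mem_ofList, hmem, hc']
        rw [PySem.Dict.items_insert_of_contains d _ hcont, hd]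
        simp only [itemsOf, hset]
        have hx : x ∈ PySem.Set.ofList p := (PySem.Set.mem_ofList p x).mpr hmem
        have haddx : (PySem.Set.ofList p).add x = PySem.Set.ofList p := by
          simp [PySem.Set.add, hx]
        rw [haddx, List.map_map]
        apply List.map_congr_left
        intro k hk
        have hkp : k ∈ p := by
          have := (List.mem_filter.mp hk).1
          exact (PySem.Set.mem_ofList p k).mp this
        by_cases hkx : k = x
        · subst hkx
          simp [List.count_append]
        · simp [Function.comp, hkx, List.count_append, List.count_singleton]
          omega
      · -- x fresh: get? = none, append (x, 0)
        have hget : d.get? x = none := by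
          rw [PySem.Dict.get?_eq_none_iff_not_mem_keys, hkeys]
          simp [List.mem_filter, PySem.Set.mem_ofList, hmem]
        rw [hget]
        apply ih
        have hcont : d.contains x = false := by
          rw [PySem.Dict.contains_eq_decide_mem_keys, hkeys]
          simp [List.mem_filter, PySem.Set.mem_ofList, hmem]
        rw [PySem.Dict.items_insert_of_not_contains d _ hcont, hd]
        simp only [itemsOf, hset]
        have hx : x ∉ PySem.Set.ofList p := fun h => hmem ((PySem.Set.mem_ofList p x).mp h)
        have haddx : (PySem.Set.ofList p).add x = PySem.Set.ofList p ++ [x] := by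
          simp [PySem.Set.add, hx]
        rw [haddx, List.filter_append, List.map_append]
        congr 1
        · apply List.map_congr_left
          intro k hk
          have hkp : k ∈ p := (PySem.Set.mem_ofList p k).mp (List.mem_filter.mp hk).1
          have hkx : k ≠ x := fun h => hmem (h ▸ hkp)
          simp [List.count_append, List.count_singleton]
          omega
        · have hcx0 : List.count x p = 0 := List.count_eq_zero.mpr hmem
          simp [hc', hcx0, List.count_singleton]
    · -- not duplicated: A skips it, and it never enters itemsOf
      have hc' : ¬ 1 < List.count x array := hc
      rw [if_neg hc]
      apply ih
      rw [hd]
      simp only [itemsOf, hset]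
      have hfilter : ((PySem.Set.ofList p).add x).filter (fun k => decide (List.count k array > 1))
          = (PySem.Set.ofList p).filter (fun k => decide (List.count k array > 1)) := by
        by_cases hxp : x ∈ p
        · have hx : x ∈ PySem.Set.ofList p := (PySem.Set.mem_ofList p x).mpr hxp
          simp [PySem.Set.add, hx]
        · have hx : x ∉ PySem.Set.ofList p := fun h => hxp ((PySem.Set.mem_ofList p x).mp h)
          have haddx : (PySem.Set.ofList p).add x = PySem.Set.ofList p ++ [x] := by
            simp [PySem.Set.add, hx]
          rw [haddx, List.filter_append]
          simp [hc']
      rw [hfilter]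
      apply List.map_congr_left
      intro k hk
      have hdup : List.count k array > 1 := by
        have := (List.mem_filter.mp hk).2; simpa using this
      have hkx : k ≠ x := by
        intro h; subst h; exact hc (by simpa [PySem.List.count] using hdup)
      simp [List.count_append, List.count_singleton]
      omega

lemma A_eq_itemsOf (array : List Int) : count_duplicate array = itemsOf array array := by
  have := loopA array array [] PySem.Dict.empty (by rfl)
  simpa [count_duplicate] using this

lemma B_eq_itemsOf (array : List Int) : count_duplicate_alt array = itemsOf array array := by
  unfold count_duplicate_alt
  rw [PySem.Dict.foldl_insert_getD_add_one_eq_counter]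
  show (List.foldl (fun r (p : Int × Int) => if p.2 > 1 then r.insert p.1 (p.2 - 1) else r)
      PySem.Dict.empty (PySem.Dict.counter array).items).items = itemsOf array array
  rw [PySem.Dict.items_counter]
  have hdec : (fun (r : PySem.Dict Int Int) (p : Int × Int) => if p.2 > 1 then r.insert p.1 (p.2 - 1) else r)
      = (fun r p => if (fun (q : Int × Int) => decide (q.2 > 1)) p = true then r.insert p.1 (p.2 - 1) else r) := by
    funext r p; simp
  rw [hdec, ← List.foldl_filter, List.filter_map]
  rw [PySem.Dict.items_foldl_insert_fresh _ Prod.fst (fun p => p.2 - 1) _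
      (by intro a _; exact PySem.Dict.contains_empty a.1)
      (by
        rw [List.map_map]
        exact ((PySem.Set.nodup_ofList array).filter _).map (fun _ _ h => h))]
  simp only [itemsOf]
  have hemp : (PySem.Dict.empty : PySem.Dict Int Int).items = [] := rfl
  rw [hemp, List.nil_append, List.map_map]
  have hfil : List.filter ((fun (q : Int × Int) => decide (q.2 > 1)) ∘ fun k => (k, (List.count k array : Int)))
        (PySem.Set.ofList array)
      = List.filter (fun k => decide (List.count k array > 1)) (PySem.Set.ofList array) := by
    apply List.filter_congr
    intro k _
    simp [Function.comp]
  rw [hfil]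
  apply List.map_congr_left
  intro k _
  rfl

-- ===== VERDICT (by name: the statement is the Claim_ definition above) =====
theorem count_duplicate_spec : Claim_equal_count_duplicate := by
  intro array _
  show count_duplicate array = count_duplicate_alt array
  rw [A_eq_itemsOf, B_eq_itemsOf]
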